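-- pv_equiv track=rewrite | github.com/jnbarnesUdel/Applied-Crypto | Assignment6/main.py | Bhash
-- ===== SOURCE A (Python) =====
-- def Mult(k, m): #for doing
--   p = 2**64 + 1
--   temp = 0
--   for n in range(len(m)):
--     temp = temp + ord(m[n]) * (k**n)
--
--   return (temp % p)
--
-- def Bhash(H, A, C):
--   prev = A[0]
--   for j in range(len(A) -1): #take care of the A blocks
--     prev = Mult(H[0], hex(prev)[2:])
--     prev = prev ^ A[j+1]
--   for i in range((len(C))): #take care of the cipher blocks
--     prev = Mult(H[0], hex(prev)[2:])
--     prev = prev ^ C[i]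
--   leng = (len(A) << 32) | (len(C)) #first 32bits are length of A last 32 are lenght of C
--   prev = prev ^ leng
--   return prev
-- ===== SOURCE B (Python) =====
-- def Bhash(H, A, C):
--     # Horner fold with modular reduction at every step instead of building
--     # big powers k**n; one fold over the tail-of-A and C blocks.
--     p = (1 << 64) + 1
--     blocks = A[1:] + C
--     k = H[0] % p if blocks else 0
--     prev = A[0]
--     for x in blocks:
--         acc = 0
--         for ch in reversed(hex(prev)[2:]):
--             acc = (acc * k + ord(ch)) % p
--         prev = acc ^ x
--     return prev ^ ((len(A) << 32) | len(C))
-- ===== Notes on version B (the rewrite author's own statement) =====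
-- stated objective: alternative
-- what changed: Replaces the per-block sum of ord(digit)*k**n over freshly recomputed big-integer powers with a single Horner fold that reduces mod p at every step, and flattens the two index loops into one fold over A[1:]+C.
import Mathlib
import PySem

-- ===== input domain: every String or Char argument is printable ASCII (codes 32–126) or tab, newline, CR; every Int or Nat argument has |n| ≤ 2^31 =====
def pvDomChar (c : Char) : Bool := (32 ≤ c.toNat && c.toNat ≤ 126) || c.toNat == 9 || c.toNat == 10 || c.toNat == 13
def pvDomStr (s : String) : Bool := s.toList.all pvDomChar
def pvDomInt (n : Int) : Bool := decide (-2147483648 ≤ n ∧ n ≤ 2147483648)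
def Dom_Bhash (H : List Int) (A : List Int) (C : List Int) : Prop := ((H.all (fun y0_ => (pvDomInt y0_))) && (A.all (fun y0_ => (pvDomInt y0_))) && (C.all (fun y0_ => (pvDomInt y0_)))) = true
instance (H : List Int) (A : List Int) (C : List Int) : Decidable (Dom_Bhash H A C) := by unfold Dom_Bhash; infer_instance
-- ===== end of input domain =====

-- B replaces A's per-block power sum (temp + ord*k**n, mod once at the end) by a Horner
-- fold reducing mod p each step, and one fold over A[1:]+C instead of two index loops (alternative algorithm, similar cost).


-- ===== PORT A =====
-- shared helper: Python's ord on a char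
def pvOrd (c : Char) : Int := (c.toNat : Int)

-- shared helper: hex digits of a Nat, lowercase, no prefix (hand-ported: PySem has no hex)
def pvHexDigit (n : Nat) : Char := if n < 10 then Char.ofNat (48 + n) else Char.ofNat (87 + n)

def pvHexChars (n : Nat) : List Char :=
  if _h : n < 16 then [pvHexDigit n]
  else pvHexChars (n / 16) ++ [pvHexDigit (n % 16)]
decreasing_by exact Nat.div_lt_self (by omega) (by omega)

-- shared helper: hex(n)[2:]  — for n < 0, hex(n) = '-0x…' so [2:] keeps an 'x' (exact Python behaviour)
def pvHexTail (n : Int) : List Char :=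
  if n < 0 then 'x' :: pvHexChars (-n).toNat else pvHexChars n.toNat

-- A's Mult: temp = Σ ord(m[n]) * k**n, one mod at the end
def Mult (k : Int) (m : List Char) : Int :=
  let p : Int := 2 ^ 64 + 1
  let temp : Int := (PySem.List.pyRange 0 (m.length : Int) 1).foldl
    (fun temp n => temp + pvOrd (PySem.List.pyGetD m n ' ') * k ^ n.toNat) 0
  PySem.Int.mod temp p

def Bhash (H : List Int) (A : List Int) (C : List Int) : Int :=
  let prev0 : Int := PySem.List.pyGetD A 0 0
  let prev1 : Int := (PySem.List.pyRange 0 ((A.length : Int) - 1) 1).foldl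
    (fun prev j => PySem.Int.bxor (Mult (PySem.List.pyGetD H 0 0) (pvHexTail prev))
                     (PySem.List.pyGetD A (j + 1) 0)) prev0
  let prev2 : Int := (PySem.List.pyRange 0 (C.length : Int) 1).foldl
    (fun prev i => PySem.Int.bxor (Mult (PySem.List.pyGetD H 0 0) (pvHexTail prev))
                     (PySem.List.pyGetD C i 0)) prev1
  let leng : Int := PySem.Int.bor ((A.length : Int) <<< 32) (C.length : Int)
  PySem.Int.bxor prev2 leng

-- ===== PORT B =====
-- Horner step over the reversed hex digits, reduced mod p at every step
def multAlt (k' : Int) (prev : Int) : Int :=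
  let p : Int := 2 ^ 64 + 1
  (pvHexTail prev).reverse.foldl (fun acc ch => PySem.Int.mod (acc * k' + pvOrd ch) p) 0

def Bhash_alt (H : List Int) (A : List Int) (C : List Int) : Int :=
  let p : Int := 2 ^ 64 + 1
  let blocks : List Int := PySem.List.slice A (some 1) none ++ C
  let k' : Int := if blocks.isEmpty then 0 else PySem.Int.mod (PySem.List.pyGetD H 0 0) p
  let prev : Int := blocks.foldl
    (fun prev x => PySem.Int.bxor (multAlt k' prev) x) (PySem.List.pyGetD A 0 0)
  PySem.Int.bxor prev (PySem.Int.bor ((A.length : Int) <<< 32) (C.length : Int))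

-- ===== PRECONDITION & SPEC =====
-- Python A raises IndexError on A = [] (A[0]) and on H = [] whenever Mult is reached
-- (i.e. unless A is a singleton and C is empty); Pre_ excludes exactly those inputs.
def Pre_Bhash (H : List Int) (A : List Int) (C : List Int) : Prop :=
  A ≠ [] ∧ (H ≠ [] ∨ (A.length = 1 ∧ C = []))
instance (H : List Int) (A : List Int) (C : List Int) : Decidable (Pre_Bhash H A C) := by
  unfold Pre_Bhash; infer_instance

def pvWitness_Bhash : List Int × List Int × List Int := ([3], [5, 7], [11])

def Spec_Bhash (H : List Int) (A : List Int) (C : List Int) (out : Int) : Prop := out = Bhash_alt H A C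
instance (H : List Int) (A : List Int) (C : List Int) (out : Int) : Decidable (Spec_Bhash H A C out) := by
  unfold Spec_Bhash; infer_instance

-- ===== CLAIM (what is proved, stated in full; the proofs are below) =====
def Claim_equal_Bhash : Prop := ∀ (H : List Int) (A : List Int) (C : List Int), Dom_Bhash H A C → Pre_Bhash H A C → Spec_Bhash H A C (Bhash H A C)

-- ===== LEMMAS AND PROOFS =====

-- the polynomial Σ ord(m[n]) * k^n, written structurally
def pvPoly (k : Int) : List Char → Int
  | [] => 0
  | c :: m => pvOrd c + k * pvPoly k m

theorem pvPoly_append_singleton (k : Int) (m : List Char) (c : Char) :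
    pvPoly k (m ++ [c]) = pvPoly k m + pvOrd c * k ^ m.length := by
  induction m with
  | nil => simp [pvPoly]
  | cons d m ih => simp [pvPoly, ih, pow_succ]; ring

-- A's range-indexed sum computes pvPoly
theorem pvMult_sum (k : Int) (m : List Char) (t : Int) :
    (PySem.List.pyRange 0 (m.length : Int) 1).foldl
      (fun temp n => temp + pvOrd (PySem.List.pyGetD m n ' ') * k ^ n.toNat) t
    = t + pvPoly k m := by
  induction m using List.reverseRecOn generalizing t with
  | nil => simp [pvPoly]
  | append_singleton m c ih =>
    have h1 : (((m ++ [c]).length : Nat) : Int) = (m.length : Int) + 1 := by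
      simp
    rw [h1, PySem.List.pyRange_one_succ_right (Int.natCast_nonneg _), List.foldl_append]
    rw [PySem.List.foldl_congr_mem _ _
      (fun temp n => temp + pvOrd (PySem.List.pyGetD m n ' ') * k ^ n.toNat) t
      (by
        intro acc n hn
        obtain ⟨hn0, hn1⟩ := PySem.List.mem_pyRange_one.mp hn
        have e1 := PySem.List.pyGetD_eq_getElem (m ++ [c]) ' ' hn0 (by simp; omega)
        have e2 := PySem.List.pyGetD_eq_getElem m ' ' hn0 (by omega)
        simp only [e1, e2]
        rw [List.getElem_append_left])]
    rw [ih]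
    simp only [List.foldl_cons, List.foldl_nil, PySem.List.pyGetD_natCast, Int.toNat_natCast]
    rw [pvPoly_append_singleton]
    have hc : (m ++ [c]).getD m.length ' ' = c := by
      simp [List.getD_eq_getElem?_getD]
    rw [hc, add_assoc]

-- B's Horner fold computes pvPoly mod p
theorem pvHorner (k : Int) (m : List Char) :
    m.reverse.foldl (fun acc ch => PySem.Int.mod (acc * PySem.Int.mod k (2 ^ 64 + 1) + pvOrd ch) (2 ^ 64 + 1)) 0
    = PySem.Int.mod (pvPoly k m) (2 ^ 64 + 1) := by
  have hp : (0 : Int) < 2 ^ 64 + 1 := by positivity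
  induction m with
  | nil => simp [pvPoly]
  | cons c m ih =>
    rw [List.reverse_cons, List.foldl_append, ih]
    simp only [List.foldl_cons, List.foldl_nil, pvPoly,
      PySem.Int.mod_eq_emod_of_pos hp]
    rw [Int.add_emod, ← Int.mul_emod, ← Int.add_emod]
    congr 1
    ring

-- the two per-block step functions agree pointwise
theorem pvStep (k prev : Int) :
    Mult k (pvHexTail prev) = multAlt (PySem.Int.mod k (2 ^ 64 + 1)) prev := by
  unfold Mult multAlt
  rw [pvMult_sum, pvHorner, Int.zero_add]

-- A's first loop (indices j, reading A[j+1]) is a fold over A.tail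
theorem pvLoopA {α β : Type} (xs : List α) (d : α) (f : β → α → β) (init : β) :
    (PySem.List.pyRange 0 ((xs.length : Int) - 1) 1).foldl
      (fun acc j => f acc (PySem.List.pyGetD xs (j + 1) d)) init
    = xs.tail.foldl f init := by
  have h : PySem.List.pyRange 0 ((xs.length : Int) - 1) 1
      = (PySem.List.pyRange 1 (xs.length : Int) 1).map (fun j => j - 1) := by
    rw [PySem.List.pyRange_one, PySem.List.pyRange_one]
    simp only [List.map_map, Int.sub_zero]
    apply List.map_congr_left
    intro n _
    simp [Function.comp]
  rw [h, List.foldl_map]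
  simp only [sub_add_cancel]
  rw [PySem.List.foldl_pyRange_pyGetD' xs d f init (by norm_num)]
  simp [List.drop_one]

-- ===== VERDICT (by name: the statement is the Claim_ definition above) =====
theorem Bhash_spec : Claim_equal_Bhash := by
  intro H A C _dom _pre
  unfold Spec_Bhash Bhash Bhash_alt
  simp only [PySem.List.slice_from_one]
  rw [pvLoopA A 0 (fun prev x =>
        PySem.Int.bxor (Mult (PySem.List.pyGetD H 0 0) (pvHexTail prev)) x),
      PySem.List.foldl_pyRange_zero_pyGetD' C 0 (fun prev x =>
        PySem.Int.bxor (Mult (PySem.List.pyGetD H 0 0) (pvHexTail prev)) x)]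
  have hstep : (fun (prev x : Int) =>
      PySem.Int.bxor (Mult (PySem.List.pyGetD H 0 0) (pvHexTail prev)) x)
      = fun prev x =>
        PySem.Int.bxor (multAlt (PySem.Int.mod (PySem.List.pyGetD H 0 0) (2 ^ 64 + 1)) prev) x := by
    funext prev x
    rw [pvStep]
  rw [hstep]
  by_cases hb : A.tail ++ C = []
  · obtain ⟨ha, hc⟩ := List.append_eq_nil_iff.mp hb
    simp [ha, hc]
  · simp only [List.isEmpty_eq_false_iff.mpr hb, Bool.false_eq_true, if_false]
    rw [List.foldl_append]
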